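-- pv_equiv track=rewrite | github.com/joelstephen97/cv_analysis | cv_parser.py | _analyze_text_layout
-- ===== SOURCE A (Python) =====
-- from typing import Dict, List, Optional, Tuple
--
-- def _analyze_text_layout(text: str) -> Dict[str, List[Tuple[int, int]]]:
--     """Analyze text layout to identify section boundaries based on spacing and formatting"""
--     lines = text.split('\n')
--     line_info = []
--
--     for i, line in enumerate(lines):
--         if not line.strip():
--             line_info.append({"index": i, "type": "blank"})
--             continue
--
--         indent = len(line) - len(line.lstrip())
--         is_all_caps = line.strip().isupper()
--         is_title_case = line.strip().istitle()
--
--         line_type = "content"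
--         if is_all_caps and len(line.strip()) < 30:
--             line_type = "heading"
--         elif is_title_case and indent < 4:
--             line_type = "subheading"
--
--         line_info.append({
--             "index": i,
--             "text": line.strip(),
--             "indent": indent,
--             "type": line_type
--         })
--
--     sections = {}
--     current_section = None
--     section_start = 0
--
--     for i, info in enumerate(line_info):
--         if info["type"] == "heading":
--             if current_section:
--                 sections[current_section] = (section_start, info["index"])
--
--             current_section = info["text"].lower()
--             section_start = info["index"] + 1
--
--     if current_section:
--         sections[current_section] = (section_start, len(lines))
--
--     return sections
-- ===== SOURCE B (Python) =====
-- def _analyze_text_layout(text: str):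
--     """Single streaming pass: detect headings directly, no intermediate line table."""
--     lines = text.split('\n')
--     sections = {}
--     current_section = None
--     section_start = 0
--     for i, line in enumerate(lines):
--         stripped = line.strip()
--         if stripped.isupper() and len(stripped) < 30:
--             if current_section:
--                 sections[current_section] = (section_start, i)
--             current_section = stripped.lower()
--             section_start = i + 1
--     if current_section:
--         sections[current_section] = (section_start, len(lines))
--     return sections
-- ===== Notes on version B (the rewrite author's own statement) =====
-- stated objective: simpler
-- what changed: B replaces A's two passes (building an intermediate per-line info table with indent/istitle classification, then scanning it) by a single streaming pass over enumerate(lines) that detects headings directly and never builds the table.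
import Mathlib
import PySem

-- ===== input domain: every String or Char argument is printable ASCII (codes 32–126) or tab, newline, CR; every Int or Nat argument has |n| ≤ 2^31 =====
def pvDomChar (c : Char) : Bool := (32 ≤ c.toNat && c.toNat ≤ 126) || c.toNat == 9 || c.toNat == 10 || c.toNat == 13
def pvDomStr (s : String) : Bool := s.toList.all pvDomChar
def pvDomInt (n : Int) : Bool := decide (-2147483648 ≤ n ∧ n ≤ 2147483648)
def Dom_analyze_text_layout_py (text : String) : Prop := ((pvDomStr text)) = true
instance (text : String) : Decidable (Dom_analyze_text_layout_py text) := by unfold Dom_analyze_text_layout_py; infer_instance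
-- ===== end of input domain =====

-- B replaces A's two passes (an intermediate per-line info table, then a scan of it) by one
-- streaming pass that detects headings directly; objective: simpler (no speed claim).

-- shared primitive ports (PySem has no string-level isupper/istitle): exact on the ASCII domain
-- Python s.isupper(): at least one cased character and no lowercase one (ASCII: cased = alpha)
def pyStrIsupper (cs : List Char) : Bool :=
  cs.any (fun c => PySem.Chars.isalpha c) && cs.all (fun c => !PySem.Chars.islower c)

-- Python s.istitle() on ASCII: state = (previous char cased, ok so far, seen a cased char)
def pyStrIstitle (cs : List Char) : Bool :=
  let st := cs.foldl (fun (st : Bool × Bool × Bool) c =>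
    let (prevCased, ok, seen) := st
    if PySem.Chars.isupper c then (true, ok && !prevCased, true)
    else if PySem.Chars.islower c then (true, ok && prevCased, true)
    else (false, ok, seen)) (false, true, false)
  st.2.1 && st.2.2

-- ===== PORT A =====
-- text.split('\n'): sep is the nonempty literal "\n", so split? is some on every input
def pyLines (text : String) : List String := (PySem.Str.split? text "\n").getD []

inductive LInfo
  | blank (index : Int)
  | line (index : Int) (text : String) (indent : Int) (ty : String)

-- body of A's first loop (builds one line_info record)
def mkInfoA (i : Int) (line : String) : LInfo :=
  if (PySem.Str.strip line).toList.isEmpty then LInfo.blank i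
  else
    let indent : Int := (PySem.Str.len line : Int) - (PySem.Str.len (PySem.Str.lstrip line) : Int)
    let isAllCaps := pyStrIsupper (PySem.Str.strip line).toList
    let isTitleCase := pyStrIstitle (PySem.Str.strip line).toList
    let ty := if isAllCaps && decide ((PySem.Str.len (PySem.Str.strip line) : Int) < 30) then "heading"
              else if isTitleCase && decide (indent < 4) then "subheading"
              else "content"
    LInfo.line i (PySem.Str.strip line) indent ty

-- body of A's second loop (the enumerate index i is unused in Python: only info["index"] is read)
def stepA (st : PySem.Dict String (Int × Int) × Option String × Int) (info : LInfo) :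
    PySem.Dict String (Int × Int) × Option String × Int :=
  match info with
  | LInfo.blank _ => st
  | LInfo.line idx txt _ ty =>
    if ty = "heading" then
      let (sections, cur, start) := st
      let sections := match cur with          -- 'if current_section:' (None or empty string falsy)
        | some c => if c = "" then sections else sections.insert c (start, idx)
        | none => sections
      (sections, some (PySem.Str.lower txt), idx + 1)
    else st

def analyze_text_layout_py (text : String) : List (String × Int × Int) :=
  let lines := pyLines text
  let line_info := (PySem.List.enumerate lines 0).foldl (fun acc p => acc ++ [mkInfoA p.1 p.2]) []
  let st := line_info.foldl stepA (PySem.Dict.empty, none, 0)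
  let sections := match st.2.1 with           -- 'if current_section:'
    | some c => if c = "" then st.1 else st.1.insert c (st.2.2, (lines.length : Int))
    | none => st.1
  sections.items

-- ===== PORT B =====
-- body of B's single streaming loop
def stepB (st : PySem.Dict String (Int × Int) × Option String × Int) (p : Int × String) :
    PySem.Dict String (Int × Int) × Option String × Int :=
  let stripped := PySem.Str.strip p.2
  if pyStrIsupper stripped.toList && decide ((PySem.Str.len stripped : Int) < 30) then
    let (sections, cur, start) := st
    let sections := match cur with            -- 'if current_section:'
      | some c => if c = "" then sections else sections.insert c (start, p.1)
      | none => sections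
    (sections, some (PySem.Str.lower stripped), p.1 + 1)
  else st

def analyze_text_layout_py_alt (text : String) : List (String × Int × Int) :=
  let lines := pyLines text
  let st := (PySem.List.enumerate lines 0).foldl stepB (PySem.Dict.empty, none, 0)
  let sections := match st.2.1 with           -- 'if current_section:'
    | some c => if c = "" then st.1 else st.1.insert c (st.2.2, (lines.length : Int))
    | none => st.1
  sections.items

-- ===== PRECONDITION & SPEC =====
def Spec_analyze_text_layout_py (text : String) (out : List (String × Int × Int)) : Prop := out = analyze_text_layout_py_alt text
instance (text : String) (out : List (String × Int × Int)) : Decidable (Spec_analyze_text_layout_py text out) := by unfold Spec_analyze_text_layout_py; infer_instance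

-- ===== CLAIM (what is proved, stated in full; the proofs are below) =====
def Claim_equal_analyze_text_layout_py : Prop := ∀ (text : String), Dom_analyze_text_layout_py text → Spec_analyze_text_layout_py text (analyze_text_layout_py text)

-- ===== LEMMAS AND PROOFS =====

-- A's loop-body applied to a line's info record is exactly B's loop-body applied to the line
theorem stepA_mkInfoA (st : PySem.Dict String (Int × Int) × Option String × Int) (p : Int × String) :
    stepA st (mkInfoA p.1 p.2) = stepB st p := by
  unfold mkInfoA stepA stepB
  by_cases hb : (PySem.Str.strip p.2).toList.isEmpty
  · simp [pyStrIsupper, List.isEmpty_iff.mp hb]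
  · rw [if_neg hb]
    by_cases hh : (pyStrIsupper (PySem.Str.strip p.2).toList &&
        decide ((PySem.Str.len (PySem.Str.strip p.2) : Int) < 30)) = true
    · rw [if_pos hh]
      simp only [Bool.and_eq_true, decide_eq_true_eq] at hh
      simp only [pysem] at hh
      simp [hh.1]; omega
    · rw [if_neg hh]
      simp only [Bool.not_eq_true] at hh
      simp
      split <;> simp_all

theorem analyze_text_layout_py_eq (text : String) :
    analyze_text_layout_py text = analyze_text_layout_py_alt text := by
  simp only [analyze_text_layout_py, analyze_text_layout_py_alt]
  have h1 : ((PySem.List.enumerate (pyLines text) 0).foldl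
      (fun acc p => acc ++ [mkInfoA p.1 p.2]) []) =
      (PySem.List.enumerate (pyLines text) 0).map (fun p => mkInfoA p.1 p.2) := by
    simpa using PySem.List.foldl_append_singleton_eq_map (l := PySem.List.enumerate (pyLines text) 0)
      (f := fun p : Int × String => mkInfoA p.1 p.2) (acc := [])
  rw [h1, List.foldl_map]
  simp only [stepA_mkInfoA]

-- ===== VERDICT (by name: the statement is the Claim_ definition above) =====
theorem analyze_text_layout_py_spec : Claim_equal_analyze_text_layout_py := by
  intro text _
  unfold Spec_analyze_text_layout_py
  exact analyze_text_layout_py_eq text
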